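-- pv_equiv track=rewrite | github.com/kkr010128/codebert | problem258/problem258_113.py | solve
-- ===== SOURCE A (Python) =====
-- def solve(n):
--     if n % 2 == 1:
--         return 0
--     div_2 = 0
--     cur = 2
--     while cur <= n:
--         div_2 += (n // cur)
--         cur = cur * 2
--     div_5 = 0
--     cur = 5
--     while cur <= n:
--         div_5 += (n // cur) // 2
--         cur = cur * 5
--     return min(div_2, div_5)
-- ===== SOURCE B (Python) =====
-- def solve(n):
--     if n % 2 == 1:
--         return 0
--     m = n // 2
--     count = 0
--     p = 5
--     while p <= m:
--         count += m // p
--         p *= 5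
--     return count
-- ===== Notes on version B (the rewrite author's own statement) =====
-- stated objective: simpler
-- what changed: Uses the identity that for even n the double factorial equals a power of two times the factorial of half of n, whose two-exponent always dominates, so the answer is just the five-exponent of that half-factorial, computed by one short loop - dropping A's entire power-of-two loop and the min.
import Mathlib
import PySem

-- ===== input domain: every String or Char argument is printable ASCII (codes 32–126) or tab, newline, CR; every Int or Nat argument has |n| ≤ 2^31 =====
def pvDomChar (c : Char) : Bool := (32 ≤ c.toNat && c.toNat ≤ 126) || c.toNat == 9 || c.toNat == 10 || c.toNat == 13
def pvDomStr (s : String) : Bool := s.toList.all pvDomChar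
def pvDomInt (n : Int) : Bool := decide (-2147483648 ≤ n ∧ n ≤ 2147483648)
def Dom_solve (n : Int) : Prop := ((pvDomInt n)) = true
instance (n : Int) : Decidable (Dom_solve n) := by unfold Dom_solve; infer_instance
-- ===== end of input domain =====

-- B replaces A's two loops and the min by the 5-adic valuation of (n//2)! alone
-- (for even n, n!! = 2^(n/2)·(n/2)! so the 2-exponent always dominates): simpler, one loop.

-- ===== PORT A =====
-- while cur <= n: div_2 += n // cur; cur = cur * 2
def solveLoop2 (n cur acc : Int) (h : 0 < cur) : Int :=
  if hc : cur ≤ n then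
    solveLoop2 n (cur * 2) (acc + PySem.Int.floordiv n cur) (by omega)
  else acc
termination_by (n + 1 - cur).toNat
decreasing_by omega

-- while cur <= n: div_5 += (n // cur) // 2; cur = cur * 5
def solveLoop5 (n cur acc : Int) (h : 0 < cur) : Int :=
  if hc : cur ≤ n then
    solveLoop5 n (cur * 5) (acc + PySem.Int.floordiv (PySem.Int.floordiv n cur) 2) (by omega)
  else acc
termination_by (n + 1 - cur).toNat
decreasing_by omega

def solve (n : Int) : Int :=
  if PySem.Int.mod n 2 = 1 then 0
  else min (solveLoop2 n 2 0 (by omega)) (solveLoop5 n 5 0 (by omega))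

-- ===== PORT B =====
-- while p <= m: count += m // p; p *= 5
def solveAltLoop (m p count : Int) (h : 0 < p) : Int :=
  if hp : p ≤ m then
    solveAltLoop m (p * 5) (count + PySem.Int.floordiv m p) (by omega)
  else count
termination_by (m + 1 - p).toNat
decreasing_by omega

def solve_alt (n : Int) : Int :=
  if PySem.Int.mod n 2 = 1 then 0
  else solveAltLoop (PySem.Int.floordiv n 2) 5 0 (by omega)

-- ===== PRECONDITION & SPEC =====
def Spec_solve (n : Int) (out : Int) : Prop := out = solve_alt n
instance (n : Int) (out : Int) : Decidable (Spec_solve n out) := by unfold Spec_solve; infer_instance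

-- ===== CLAIM (what is proved, stated in full; the proofs are below) =====
def Claim_equal_solve : Prop := ∀ (n : Int), Dom_solve n → Spec_solve n (solve n)

-- ===== LEMMAS AND PROOFS =====

theorem fd_mul (n a b : Int) (_hn : 0 ≤ n) (ha : 0 < a) (hb : 0 < b) :
    PySem.Int.floordiv n (a * b) = PySem.Int.floordiv (PySem.Int.floordiv n a) b := by
  rw [PySem.Int.floordiv_eq_ediv_of_pos (by positivity), PySem.Int.floordiv_eq_ediv_of_pos ha,
    PySem.Int.floordiv_eq_ediv_of_pos hb]
  exact (Int.ediv_ediv_of_nonneg (le_of_lt ha) ..).symm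

theorem fd_swap (n cur : Int) (hn : 0 ≤ n) (hc : 0 < cur) :
    PySem.Int.floordiv (PySem.Int.floordiv n cur) 2
      = PySem.Int.floordiv (PySem.Int.floordiv n 2) cur := by
  rw [← fd_mul n cur 2 hn hc (by omega), ← fd_mul n 2 cur hn (by omega) hc, mul_comm]

theorem loop2_ge_acc (n cur acc : Int) (h : 0 < cur) (hn : 0 ≤ n) :
    acc ≤ solveLoop2 n cur acc h := by
  fun_induction solveLoop2 with
  | case1 cur acc h hc ih =>
      refine le_trans ?_ ih
      have : 0 ≤ PySem.Int.floordiv n cur := by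
        rw [PySem.Int.floordiv_eq_ediv_of_pos h]; exact Int.ediv_nonneg hn (le_of_lt h)
      omega
  | case2 => omega

theorem loop5_le (n cur acc : Int) (h : 0 < cur) (hn : 0 ≤ n) :
    solveLoop5 n cur acc h ≤ acc + PySem.Int.floordiv (5 * PySem.Int.floordiv n cur) 4 := by
  fun_induction solveLoop5 with
  | case1 cur acc h hc ih =>
      refine le_trans ih ?_
      rw [fd_mul n cur 5 hn h (by omega)] at *
      set q := PySem.Int.floordiv n cur with hq
      have hq' : q = n / cur := by rw [hq, PySem.Int.floordiv_eq_ediv_of_pos h]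
      have hq0 : 0 ≤ q := hq' ▸ Int.ediv_nonneg hn (le_of_lt h)
      rw [PySem.Int.floordiv_eq_ediv_of_pos (b := 2) (by omega),
        PySem.Int.floordiv_eq_ediv_of_pos (b := 5) (by omega)]
      rw [PySem.Int.floordiv_eq_ediv_of_pos (b := 4) (by omega),
        PySem.Int.floordiv_eq_ediv_of_pos (b := 4) (by omega)]
      omega
  | case2 cur acc h hc =>
      have : 0 ≤ PySem.Int.floordiv n cur := by
        rw [PySem.Int.floordiv_eq_ediv_of_pos h]; exact Int.ediv_nonneg hn (le_of_lt h)
      have : 0 ≤ PySem.Int.floordiv (5 * PySem.Int.floordiv n cur) 4 := by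
        rw [PySem.Int.floordiv_eq_ediv_of_pos (by omega : (0:Int) < 4)]
        exact Int.ediv_nonneg (by omega) (by omega)
      omega

theorem loop2_stop (n cur acc : Int) (h : 0 < cur) (hc : ¬ cur ≤ n) :
    solveLoop2 n cur acc h = acc := by
  rw [solveLoop2]; simp [hc]

theorem loop5_stop (n cur acc : Int) (h : 0 < cur) (hc : ¬ cur ≤ n) :
    solveLoop5 n cur acc h = acc := by
  rw [solveLoop5]; simp [hc]

theorem altLoop_stop (m p count : Int) (h : 0 < p) (hp : ¬ p ≤ m) :
    solveAltLoop m p count h = count := by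
  rw [solveAltLoop]; simp [hp]

-- A's 5-loop computes exactly B's loop over m = n // 2.
theorem loop5_eq_alt (n cur acc : Int) (h : 0 < cur) :
    solveLoop5 n cur acc h = solveAltLoop (PySem.Int.floordiv n 2) cur acc h := by
  fun_induction solveLoop5 with
  | case1 cur acc h hc ih =>
      have hn : 0 ≤ n := by omega
      rw [fd_swap n cur hn h] at ih ⊢
      set m := PySem.Int.floordiv n 2 with hm
      have hm' : m = n / 2 := by rw [hm, PySem.Int.floordiv_eq_ediv_of_pos (by omega)]
      have hm0 : 0 ≤ m := by rw [hm']; exact Int.ediv_nonneg hn (by omega)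
      by_cases hcm : cur ≤ m
      · rw [ih]
        conv_rhs => rw [solveAltLoop]
        simp [hcm]
      · have hz : PySem.Int.floordiv m cur = 0 := by
          rw [PySem.Int.floordiv_eq_ediv_of_pos h]
          exact Int.ediv_eq_zero_of_lt hm0 (by omega)
        rw [hz, add_zero] at ih ⊢
        rw [ih, altLoop_stop _ _ _ _ (by omega), altLoop_stop _ _ _ _ hcm]
  | case2 cur acc h hc =>
      have : PySem.Int.floordiv n 2 < cur := by
        rw [PySem.Int.floordiv_eq_ediv_of_pos (by omega)]; omega
      rw [altLoop_stop _ _ _ _ (by omega)]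

theorem loop5_le_loop2 (n : Int) :
    solveLoop5 n 5 0 (by omega) ≤ solveLoop2 n 2 0 (by omega) := by
  by_cases h2 : 2 ≤ n
  · have hn : 0 ≤ n := by omega
    have h5 : solveLoop5 n 5 0 (by omega) ≤ PySem.Int.floordiv n 2 := by
      refine le_trans (loop5_le n 5 0 (by omega) hn) ?_
      rw [PySem.Int.floordiv_eq_ediv_of_pos (by omega : (0:Int) < 5),
        PySem.Int.floordiv_eq_ediv_of_pos (by omega : (0:Int) < 4),
        PySem.Int.floordiv_eq_ediv_of_pos (by omega : (0:Int) < 2)]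
      omega
    refine le_trans h5 ?_
    conv_rhs => rw [solveLoop2]
    simp only [h2, dif_pos]
    have := loop2_ge_acc n (2 * 2) (0 + PySem.Int.floordiv n 2) (by omega) hn
    omega
  · rw [loop5_stop _ _ _ _ (by omega), loop2_stop _ _ _ _ h2]

-- ===== VERDICT (by name: the statement is the Claim_ definition above) =====
theorem solve_spec : Claim_equal_solve := by
  intro n _
  unfold Spec_solve solve solve_alt
  by_cases hodd : PySem.Int.mod n 2 = 1
  · rw [if_pos hodd, if_pos hodd]
  · rw [if_neg hodd, if_neg hodd]
    rw [← loop5_eq_alt n 5 0 (by omega)]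
    exact min_eq_right (loop5_le_loop2 n)
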